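-- pv_equiv track=rewrite | github.com/Tatraa/Applied-CS-Mater | sem-1/metody-stat/test1.py | findMaximumPackages
-- ===== SOURCE A (Python) =====
-- def findMaximumPackages(cost):
--     from collections import Counter
--
--     # Count the frequency of each item cost
--     freq = Counter(cost)
--
--     # Track the maximum number of packages
--     max_packages = 0
--
--     # Check all possible package costs
--     for target_cost in freq:
--         # Initialize the count for this target cost
--         packages = 0
--
--         # Copy the frequency map so we don't modify the original
--         temp_freq = freq.copy()
--
--         # Check for combinations of two items
--         for item_cost in freq:
--             while temp_freq[item_cost] > 0 and target_cost - item_cost in temp_freq and temp_freq[target_cost - item_cost] > 0: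
--                 # If two items can form the target cost, create a package
--                 if item_cost == target_cost - item_cost and temp_freq[item_cost] > 1:
--                     # Special case: both items are the same
--                     packages += 1
--                     temp_freq[item_cost] -= 2
--                 elif item_cost != target_cost - item_cost:
--                     packages += 1
--                     temp_freq[item_cost] -= 1
--                     temp_freq[target_cost - item_cost] -= 1
--
--         # Update the maximum packages
--         max_packages = max(max_packages, packages)
--
--     return max_packages
-- ===== SOURCE B (Python) =====
-- def findMaximumPackages(cost):
--     from collections import Counter
--     freq = Counter(cost)
--     best = 0
--     for target in freq:
--         packages = 0
--         for a in freq: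
--             b = target - a
--             if b in freq:
--                 if a < b:
--                     packages += min(freq[a], freq[b])
--                 elif a == b:
--                     packages += freq[a] // 2
--         best = max(best, packages)
--     return best
-- ===== Notes on version B (the rewrite author's own statement) =====
-- stated objective: simpler
-- what changed: Replaces A's per-target copy of the counter and destructive one-package-at-a-time while loop by a direct closed-form sum: per target, min(freq[a],freq[target-a]) over pairs with a<target-a plus freq[a]//2 for the self-pair, with no copying or mutation.
import Mathlib
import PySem

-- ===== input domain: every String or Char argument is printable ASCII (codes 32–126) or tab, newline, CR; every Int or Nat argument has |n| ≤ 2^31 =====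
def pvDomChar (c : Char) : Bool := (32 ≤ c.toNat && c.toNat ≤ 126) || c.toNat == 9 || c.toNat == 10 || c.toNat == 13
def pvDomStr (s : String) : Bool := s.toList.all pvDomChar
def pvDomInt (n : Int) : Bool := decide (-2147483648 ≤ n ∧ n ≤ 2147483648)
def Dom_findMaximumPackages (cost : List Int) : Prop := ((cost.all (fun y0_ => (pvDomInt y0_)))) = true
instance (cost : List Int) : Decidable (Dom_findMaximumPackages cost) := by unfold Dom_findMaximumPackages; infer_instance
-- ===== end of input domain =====

-- B replaces A's per-target counter copy and destructive one-package-at-a-time while loop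
-- by a direct closed-form sum over pairs (min of the two counts, plus count // 2 for the self pair).

-- ===== PORT A =====
-- A's inner `while`, step for step: the condition, the self-pair branch and the
-- distinct-pair branch. `fuel` only makes the recursion total (Python's while has none);
-- it is always called with enough fuel for the loop's real iterations. In the state where
-- the condition holds but neither branch fires Python loops forever (excluded by Pre_);
-- there this port returns the current state.

def pvWhileA (T a : Int) : Nat → PySem.Dict Int Int → Int → (PySem.Dict Int Int × Int)
  | 0, temp, packages => (temp, packages)
  | fuel + 1, temp, packages =>
    if temp.getD a 0 > 0 ∧ temp.contains (T - a) = true ∧ temp.getD (T - a) 0 > 0 then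
      if a = T - a ∧ temp.getD a 0 > 1 then
        pvWhileA T a fuel (temp.modify a 0 (· - 2)) (packages + 1)
      else if a ≠ T - a then
        pvWhileA T a fuel ((temp.modify a 0 (· - 1)).modify (T - a) 0 (· - 1)) (packages + 1)
      else (temp, packages)
    else (temp, packages)

def findMaximumPackages (cost : List Int) : Int :=
  let freq := PySem.Dict.counter cost
  freq.keys.foldl (fun max_packages target_cost =>
    let r := freq.keys.foldl (fun (st : PySem.Dict Int Int × Int) item_cost =>
      pvWhileA target_cost item_cost ((st.1.getD item_cost 0).natAbs + 1) st.1 st.2)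
      (freq, 0)
    max max_packages r.2) 0

-- ===== PORT B =====

def findMaximumPackages_alt (cost : List Int) : Int :=
  let freq := PySem.Dict.counter cost
  freq.keys.foldl (fun best target =>
    max best (freq.keys.foldl (fun packages a =>
      let b := target - a
      if freq.contains b = true then
        if a < b then packages + min (freq.getD a 0) (freq.getD b 0)
        else if a = b then packages + PySem.Int.floordiv (freq.getD a 0) 2
        else packages
      else packages) 0)) 0

-- ===== PRECONDITION & SPEC =====
-- Pre_ excludes exactly the inputs on which A never returns: A's while loop diverges
-- (neither branch fires while its condition stays true) precisely when some value c of odd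
-- multiplicity has its double 2*c also in cost, for target 2*c.

def Pre_findMaximumPackages (cost : List Int) : Prop :=
  ∀ c ∈ cost, (2 * c) ∈ cost → cost.count c % 2 = 0

instance (cost : List Int) : Decidable (Pre_findMaximumPackages cost) := by
  unfold Pre_findMaximumPackages; infer_instance

def pvWitness_findMaximumPackages : List Int := [2, 2, 4, 3, 5]

def Spec_findMaximumPackages (cost : List Int) (out : Int) : Prop := out = findMaximumPackages_alt cost
instance (cost : List Int) (out : Int) : Decidable (Spec_findMaximumPackages cost out) := by unfold Spec_findMaximumPackages; infer_instance

-- ===== CLAIM (what is proved, stated in full; the proofs are below) =====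
def Claim_equal_findMaximumPackages : Prop := ∀ (cost : List Int), Dom_findMaximumPackages cost → Pre_findMaximumPackages cost → Spec_findMaximumPackages cost (findMaximumPackages cost)

-- ===== LEMMAS AND PROOFS =====

def pvF (cost : List Int) (x : Int) : Int := (cost.count x : Int)

def pvSpent (cost : List Int) (T : Int) (pre : List Int) (x : Int) : Int :=
  if (T - x) ∈ cost then
    if x = T - x then (if x ∈ pre then pvF cost x else 0)
    else if x ∈ pre ∨ (T - x) ∈ pre then min (pvF cost x) (pvF cost (T - x)) else 0
  else 0

def pvInv (cost : List Int) (T : Int) (pre : List Int) (temp : PySem.Dict Int Int) : Prop :=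
  (∀ x, temp.contains x = decide (x ∈ cost)) ∧
  (∀ x, temp.getD x 0 = pvF cost x - pvSpent cost T pre x)

def pvCStep (cost : List Int) (T : Int) (pre : List Int) (a : Int) : Int :=
  if (T - a) ∈ cost then
    if a = T - a then PySem.Int.floordiv (pvF cost a) 2
    else if (T - a) ∈ pre then 0
    else min (pvF cost a) (pvF cost (T - a))
  else 0

def pvQ (cost : List Int) (T : Int) (ks : List Int) (x : Int) : Int :=
  if x = T - x then PySem.Int.floordiv (pvF cost x) 2
  else if (T - x) ∈ ks ∧ x < T - x then min (pvF cost x) (pvF cost (T - x))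
  else 0

def pvGB (cost : List Int) (T : Int) (a : Int) : Int :=
  if (T - a) ∈ cost then
    if a < T - a then min (pvF cost a) (pvF cost (T - a))
    else if a = T - a then PySem.Int.floordiv (pvF cost a) 2
    else 0
  else 0

theorem pvF_nonneg (cost : List Int) (x : Int) : 0 ≤ pvF cost x := by
  simp [pvF]

theorem pvF_eq_zero (cost : List Int) (x : Int) (h : x ∉ cost) : pvF cost x = 0 := by
  simp [pvF, List.count_eq_zero.mpr h]

theorem pvSpent_nil (cost : List Int) (T x : Int) : pvSpent cost T [] x = 0 := by
  simp [pvSpent]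

theorem pvSpent_append_irrel (cost : List Int) (T : Int) (pre : List Int) (a x : Int)
    (hx : x ≠ a) (hTx : T - x ≠ a) :
    pvSpent cost T (pre ++ [a]) x = pvSpent cost T pre x := by
  simp [pvSpent, List.mem_append, hx, hTx]

theorem pvWhileA_self (a : Int) (m : Nat) :
    ∀ (fuel : Nat) (temp : PySem.Dict Int Int) (p : Int), m < fuel →
    temp.getD a 0 = 2 * m → temp.contains a = true →
    ∃ temp', pvWhileA (a + a) a fuel temp p = (temp', p + m) ∧
      temp'.getD a 0 = 0 ∧ (∀ x, x ≠ a → temp'.getD x 0 = temp.getD x 0) ∧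
      (∀ x, temp'.contains x = temp.contains x) := by
  induction m with
  | zero =>
    intro fuel temp p hf hg hc
    obtain ⟨fuel, rfl⟩ := Nat.exists_eq_succ_of_ne_zero (by omega : fuel ≠ 0)
    refine ⟨temp, ?_, by simp [hg], fun x _ => rfl, fun x => rfl⟩
    simp only [pvWhileA]
    rw [if_neg (by simp [hg])]
    simp
  | succ n ih =>
    intro fuel temp p hf hg hc
    obtain ⟨fuel, rfl⟩ := Nat.exists_eq_succ_of_ne_zero (by omega : fuel ≠ 0)
    have hTa : (a + a) - a = a := by ring
    have h1 : temp.getD a 0 > 0 := by rw [hg]; push_cast; omega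
    simp only [pvWhileA, hTa]
    rw [if_pos ⟨h1, hc, h1⟩, if_pos ⟨trivial, by rw [hg]; push_cast; omega⟩]
    have hg' : (temp.modify a 0 (· - 2)).getD a 0 = 2 * n := by
      rw [PySem.Dict.getD_modify_self, hg]; push_cast; ring
    have hc' : (temp.modify a 0 (· - 2)).contains a = true := by
      rw [PySem.Dict.contains_modify]; simp [hc]
    obtain ⟨temp', heq, h0, hoth, hcon⟩ := ih fuel _ (p + 1) (by omega) hg' hc'
    refine ⟨temp', by rw [heq]; congr 1; push_cast; ring, h0, fun x hx => ?_, fun x => ?_⟩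
    · rw [hoth x hx, PySem.Dict.getD_modify]; simp [hx]
    · rw [hcon x, PySem.Dict.contains_modify]
      by_cases hxa : x = a
      · subst hxa; simp [hc]
      · simp [hxa]

theorem pvWhileA_distinct (T a : Int) (hne : a ≠ T - a) (n : Nat) :
    ∀ (k m : Int) (fuel : Nat) (temp : PySem.Dict Int Int) (p : Int),
    (min k m).toNat = n → 0 ≤ k → 0 ≤ m → n < fuel →
    temp.getD a 0 = k → temp.getD (T - a) 0 = m → temp.contains (T - a) = true →
    ∃ temp', pvWhileA T a fuel temp p = (temp', p + min k m) ∧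
      temp'.getD a 0 = k - min k m ∧ temp'.getD (T - a) 0 = m - min k m ∧
      (∀ x, x ≠ a → x ≠ T - a → temp'.getD x 0 = temp.getD x 0) ∧
      (∀ x, temp'.contains x = temp.contains x) := by
  induction n with
  | zero =>
    intro k m fuel temp p hn hk hm hf ha hb hc
    obtain ⟨fuel, rfl⟩ := Nat.exists_eq_succ_of_ne_zero (by omega : fuel ≠ 0)
    have hmin : min k m = 0 := by omega
    refine ⟨temp, ?_, by omega, by omega, fun x _ _ => rfl, fun x => rfl⟩
    simp only [pvWhileA]
    rw [if_neg (by rw [ha, hb]; omega), hmin, add_zero]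
  | succ n ih =>
    intro k m fuel temp p hn hk hm hf ha hb hc
    obtain ⟨fuel, rfl⟩ := Nat.exists_eq_succ_of_ne_zero (by omega : fuel ≠ 0)
    have hk1 : temp.getD a 0 > 0 := by omega
    have hm1 : temp.getD (T - a) 0 > 0 := by omega
    simp only [pvWhileA]
    rw [if_pos ⟨hk1, hc, hm1⟩, if_neg (by simp [hne]), if_pos hne]
    set temp2 := (temp.modify a 0 (· - 1)).modify (T - a) 0 (· - 1) with htemp2
    have ha2 : temp2.getD a 0 = k - 1 := by
      rw [htemp2]; simp [PySem.Dict.getD_modify, hne, ha]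
    have hb2 : temp2.getD (T - a) 0 = m - 1 := by
      rw [htemp2]; simp [PySem.Dict.getD_modify, Ne.symm hne, hb]
    have hc2 : temp2.contains (T - a) = true := by
      rw [htemp2, PySem.Dict.contains_modify]; simp
    obtain ⟨temp', heq, h1, h2, hoth, hcon⟩ :=
      ih (k - 1) (m - 1) fuel temp2 (p + 1) (by omega) (by omega) (by omega) (by omega) ha2 hb2 hc2
    have hmm : min (k - 1) (m - 1) = min k m - 1 := by omega
    refine ⟨temp', by rw [heq, hmm]; congr 1; ring, by omega, by omega, fun x hxa hxb => ?_, fun x => ?_⟩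
    · rw [hoth x hxa hxb, htemp2, PySem.Dict.getD_modify, if_neg hxb, PySem.Dict.getD_modify, if_neg hxa]
    · rw [hcon x, htemp2, PySem.Dict.contains_modify, PySem.Dict.contains_modify]
      by_cases hxb : x = T - a
      · simp [hxb, hc]
      · by_cases hxa : x = a
        · subst hxa
          have hca : temp.contains x = true := by
            by_contra hcc
            simp only [Bool.not_eq_true] at hcc
            rw [PySem.Dict.getD_of_not_contains temp 0 hcc] at hk1; omega
          simp [hca]
        · have b1 : (x == T - a) = false := by simp [hxb]
          have b2 : (x == a) = false := by simp [hxa]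
          rw [b1, b2]; simp

theorem pvStep (cost : List Int) (T : Int) (pre : List Int) (temp : PySem.Dict Int Int)
    (p a : Int) (ha : a ∈ cost) (hpa : a ∉ pre)
    (heven : T = a + a → (2 : Int) ∣ pvF cost a) (hinv : pvInv cost T pre temp) :
    ∃ temp', pvWhileA T a ((temp.getD a 0).natAbs + 1) temp p = (temp', p + pvCStep cost T pre a) ∧
      pvInv cost T (pre ++ [a]) temp' := by
  obtain ⟨hcont, hgd⟩ := hinv
  have hfa := pvF_nonneg cost a
  by_cases hb : (T - a) ∈ cost
  · by_cases hself : a = T - a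
    · -- self pair
      have hT : T = a + a := by omega
      subst hT
      have h2a : a + a - a = a := by ring
      rw [h2a] at hb
      have hsp : pvSpent cost (a + a) pre a = 0 := by
        simp [pvSpent, h2a, hb, hpa]
      have hga : temp.getD a 0 = pvF cost a := by rw [hgd, hsp]; ring
      obtain ⟨c, hc2⟩ := heven rfl
      have hcnn : 0 ≤ c := by omega
      have hmN : temp.getD a 0 = 2 * (c.toNat : Int) := by rw [hga, hc2]; omega
      obtain ⟨temp', heq, h0, hoth, hcon⟩ :=
        pvWhileA_self a c.toNat ((temp.getD a 0).natAbs + 1) temp p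
          (by rw [hga, hc2]; omega) hmN (by rw [hcont]; simp [ha])
      refine ⟨temp', ?_, fun x => by rw [hcon x, hcont x], fun x => ?_⟩
      · rw [heq]
        have hcast : ((c.toNat : Int)) = c := by omega
        have hfd : PySem.Int.floordiv (pvF cost a) 2 = (c.toNat : Int) := by
          rw [PySem.Int.floordiv_eq_iff_of_pos (by omega : (0:Int) < 2)]
          omega
        have : pvCStep cost (a + a) pre a = (c.toNat : Int) := by
          unfold pvCStep
          rw [h2a, if_pos ha, if_pos rfl, hfd]
        rw [this]
      · by_cases hxa : x = a
        · subst hxa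
          rw [h0]
          simp [pvSpent, h2a, ha]
        · rw [hoth x hxa, hgd x, pvSpent_append_irrel cost (a + a) pre a x hxa
            (by intro h; apply hxa; omega)]
    · -- distinct pair
      have hself' : T - a ≠ a := fun h => hself h.symm
      have hfb := pvF_nonneg cost (T - a)
      have hTb : T - (T - a) = a := by ring
      by_cases hbp : (T - a) ∈ pre
      · -- partner already consumed
        have hspa : pvSpent cost T pre a = min (pvF cost a) (pvF cost (T - a)) := by
          simp [pvSpent, hb, hself, hbp]
        have hspb : pvSpent cost T pre (T - a) = min (pvF cost (T - a)) (pvF cost a) := by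
          simp [pvSpent, hTb, ha, hself', hbp]
        have hka : temp.getD a 0 = pvF cost a - min (pvF cost a) (pvF cost (T - a)) := by
          rw [hgd, hspa]
        have hkb : temp.getD (T - a) 0 = pvF cost (T - a) - min (pvF cost (T - a)) (pvF cost a) := by
          rw [hgd, hspb]
        obtain ⟨temp', heq, h1, h2, hoth, hcon⟩ :=
          pvWhileA_distinct T a hself 0 (temp.getD a 0) (temp.getD (T - a) 0)
            ((temp.getD a 0).natAbs + 1) temp p (by omega) (by omega) (by omega) (by omega)
            rfl rfl (by rw [hcont]; simp [hb])
        have hmin0 : min (temp.getD a 0) (temp.getD (T - a) 0) = 0 := by omega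
        rw [hmin0] at heq h1 h2
        have hcs : pvCStep cost T pre a = 0 := by simp [pvCStep, hb, hself, hbp]
        refine ⟨temp', by rw [heq, hcs], fun x => by rw [hcon x, hcont x], fun x => ?_⟩
        by_cases hxa : x = a
        · subst hxa
          rw [h1, hka]
          simp [pvSpent, hb, hself, List.mem_append, hbp]
        · by_cases hxb : x = T - a
          · subst hxb
            rw [h2, hkb]
            simp [pvSpent, hTb, ha, hself', List.mem_append, hbp]
          · rw [hoth x hxa hxb, hgd x,
              pvSpent_append_irrel cost T pre a x hxa (fun h => hxb (by omega))]
      · -- fresh pair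
        have hpb2 : a ∉ pre ∧ T - a ∉ pre := ⟨hpa, hbp⟩
        have hspa : pvSpent cost T pre a = 0 := by
          simp [pvSpent, hb, hself, hpa, hbp]
        have hspb : pvSpent cost T pre (T - a) = 0 := by
          simp [pvSpent, hTb, ha, hself', hpa, hbp]
        have hka : temp.getD a 0 = pvF cost a := by rw [hgd, hspa]; ring
        have hkb : temp.getD (T - a) 0 = pvF cost (T - a) := by rw [hgd, hspb]; ring
        obtain ⟨temp', heq, h1, h2, hoth, hcon⟩ :=
          pvWhileA_distinct T a hself (min (pvF cost a) (pvF cost (T - a))).toNat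
            (pvF cost a) (pvF cost (T - a)) ((temp.getD a 0).natAbs + 1) temp p
            rfl (by omega) (by omega) (by rw [hka]; omega) hka hkb (by rw [hcont]; simp [hb])
        have hcs : pvCStep cost T pre a = min (pvF cost a) (pvF cost (T - a)) := by
          simp [pvCStep, hb, hself, hbp]
        refine ⟨temp', by rw [heq, hcs], fun x => by rw [hcon x, hcont x], fun x => ?_⟩
        by_cases hxa : x = a
        · subst hxa
          rw [h1]
          simp [pvSpent, hb, hself, List.mem_append]
        · by_cases hxb : x = T - a
          · subst hxb
            rw [h2]
            simp [pvSpent, hTb, ha, hself', List.mem_append]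
            omega
          · rw [hoth x hxa hxb, hgd x,
              pvSpent_append_irrel cost T pre a x hxa (fun h => hxb (by omega))]
  · -- no partner in cost
    have hself : a ≠ T - a := fun h => hb (h ▸ ha)
    have h1 : temp.contains (T - a) = false := by rw [hcont]; simp [hb]
    refine ⟨temp, ?_, hcont, fun x => ?_⟩
    · have hcs : pvCStep cost T pre a = 0 := by simp [pvCStep, hb]
      rw [hcs, add_zero]
      simp only [pvWhileA]
      rw [if_neg (by simp [h1])]
    · rw [hgd x]
      by_cases hxa : x = a
      · subst hxa
        simp [pvSpent, hb]
      · by_cases hxb : T - x = a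
        · have hxval : x = T - a := by omega
          subst hxval
          have hTb : T - (T - a) = a := by ring
          have hz : pvF cost (T - a) = 0 := pvF_eq_zero cost _ hb
          have hfa' := pvF_nonneg cost a
          have hs1 : pvSpent cost T pre (T - a) = 0 := by
            unfold pvSpent
            rw [hTb, if_pos ha, if_neg (Ne.symm hself)]
            split_ifs with h
            · rw [hz]; exact min_eq_left hfa'
            · rfl
          have hs2 : pvSpent cost T (pre ++ [a]) (T - a) = 0 := by
            unfold pvSpent
            rw [hTb, if_pos ha, if_neg (Ne.symm hself)]
            split_ifs with h
            · rw [hz]; exact min_eq_left hfa'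
            · rfl
          rw [hs1, hs2]
        · rw [pvSpent_append_irrel cost T pre a x hxa hxb]

theorem pvQ_congr (cost : List Int) (T a : Int) (ks : List Int) (_hanotin : a ∉ ks)
    (x : Int) (_hx : x ∈ ks) (hxb : x ≠ T - a) :
    pvQ cost T (a :: ks) x = pvQ cost T ks x := by
  have hTx : T - x ≠ a := fun h => hxb (by omega)
  unfold pvQ
  simp [List.mem_cons, hTx]

theorem pvSum (cost : List Int) (T : Int) (pre : List Int) (a : Int) (ks : List Int)
    (hnd : (pre ++ a :: ks).Nodup) (hcov : ∀ x, x ∈ cost ↔ x ∈ pre ++ a :: ks) :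
    pvCStep cost T pre a + (ks.map (pvQ cost T ks)).sum
      = ((a :: ks).map (pvQ cost T (a :: ks))).sum := by
  have hndks : (a :: ks).Nodup := (List.nodup_append.mp hnd).2.1
  have haks : a ∉ ks := (List.nodup_cons.mp hndks).1
  have hndks' : ks.Nodup := (List.nodup_cons.mp hndks).2
  have ha : a ∈ cost := (hcov a).mpr (by simp)
  simp only [List.map_cons, List.sum_cons]
  by_cases hb : (T - a) ∈ cost
  · by_cases hself : a = T - a
    · -- self pair: only a itself is affected
      have hcs : pvCStep cost T pre a = PySem.Int.floordiv (pvF cost a) 2 := by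
        unfold pvCStep
        rw [if_pos hb, if_pos hself]
      have hqa : pvQ cost T (a :: ks) a = PySem.Int.floordiv (pvF cost a) 2 := by
        unfold pvQ
        rw [if_pos hself]
      rw [hcs, hqa, List.map_congr_left (fun x hx =>
        pvQ_congr cost T a ks haks x hx (fun h => haks (by rw [← hself] at h; rw [← h]; exact hx)))]
    · -- distinct pair
      have hTb : T - (T - a) = a := by ring
      have hba : T - a ≠ a := fun h => hself h.symm
      have hbself : (T - a) ≠ T - (T - a) := by rw [hTb]; exact hba
      have hdisj := List.disjoint_of_nodup_append hnd
      by_cases hbp : (T - a) ∈ pre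
      · -- partner already consumed by the prefix
        have hcs : pvCStep cost T pre a = 0 := by
          unfold pvCStep
          rw [if_pos hb, if_neg hself, if_pos hbp]
        have hnb : (T - a) ∉ a :: ks := fun h => hdisj hbp h
        have hqa : pvQ cost T (a :: ks) a = 0 := by
          unfold pvQ
          rw [if_neg hself, if_neg (by tauto)]
        rw [hcs, hqa, List.map_congr_left (fun x hx =>
          pvQ_congr cost T a ks haks x hx (fun h => hnb (by rw [← h]; exact List.mem_cons_of_mem a hx)))]
      · -- fresh pair: T - a must be among the remaining keys
        have hbin : (T - a) ∈ ks := by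
          have := (hcov (T - a)).mp hb
          rw [List.mem_append, List.mem_cons] at this
          rcases this with h | h | h
          · exact absurd h hbp
          · exact absurd h hba
          · exact h
        have hcs : pvCStep cost T pre a = min (pvF cost a) (pvF cost (T - a)) := by
          unfold pvCStep
          rw [if_pos hb, if_neg hself, if_neg hbp]
        obtain ⟨l1, l2, rfl⟩ := List.append_of_mem hbin
        have hdisj12 := List.disjoint_of_nodup_append hndks'
        have hbl1 : (T - a) ∉ l1 := fun h => hdisj12 h (by simp)
        have hbl2 : (T - a) ∉ l2 := by
          have := (List.nodup_append.mp hndks').2.1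
          exact (List.nodup_cons.mp this).1
        have hqb1 : pvQ cost T (a :: (l1 ++ (T - a) :: l2)) (T - a)
            = if T - a < a then min (pvF cost (T - a)) (pvF cost a) else 0 := by
          unfold pvQ
          rw [if_neg hbself, hTb]
          by_cases hlt : T - a < a
          · rw [if_pos ⟨by simp, hlt⟩, if_pos hlt]
          · rw [if_neg (by tauto), if_neg hlt]
        have hqb2 : pvQ cost T (l1 ++ (T - a) :: l2) (T - a) = 0 := by
          unfold pvQ
          rw [if_neg hbself, hTb, if_neg (by rintro ⟨h1, h2⟩; exact haks h1)]
        have hqa : pvQ cost T (a :: (l1 ++ (T - a) :: l2)) a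
            = if a < T - a then min (pvF cost a) (pvF cost (T - a)) else 0 := by
          unfold pvQ
          rw [if_neg hself]
          by_cases hlt : a < T - a
          · rw [if_pos ⟨by simp, hlt⟩, if_pos hlt]
          · rw [if_neg (by tauto), if_neg hlt]
        have hcongr1 : ∀ x ∈ l1, pvQ cost T (a :: (l1 ++ (T - a) :: l2)) x
            = pvQ cost T (l1 ++ (T - a) :: l2) x := fun x hx =>
          pvQ_congr cost T a _ haks x (by simp [hx]) (fun h => hbl1 (h ▸ hx))
        have hcongr2 : ∀ x ∈ l2, pvQ cost T (a :: (l1 ++ (T - a) :: l2)) x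
            = pvQ cost T (l1 ++ (T - a) :: l2) x := fun x hx =>
          pvQ_congr cost T a _ haks x (by simp [hx]) (fun h => hbl2 (h ▸ hx))
        rw [hcs, hqa]
        simp only [List.map_append, List.map_cons, List.sum_append, List.sum_cons]
        rw [List.map_congr_left hcongr1, List.map_congr_left hcongr2, hqb1, hqb2]
        rcases lt_trichotomy a (T - a) with hlt | heqq | hgt
        · rw [if_pos hlt, if_neg (by omega)]
        · exact absurd heqq hself
        · rw [if_neg (by omega), if_pos hgt, min_comm]; ring
  · -- T - a not a value at all
    have hself : a ≠ T - a := fun h => hb (h ▸ ha)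
    have hnb : (T - a) ∉ a :: ks := fun h => hb ((hcov (T - a)).mpr (by rw [List.mem_append]; tauto))
    have hcs : pvCStep cost T pre a = 0 := by simp [pvCStep, hb]
    have hqa : pvQ cost T (a :: ks) a = 0 := by
      unfold pvQ
      rw [if_neg hself, if_neg (by tauto)]
    rw [hcs, hqa, List.map_congr_left (fun x hx =>
      pvQ_congr cost T a ks haks x hx (fun h => hnb (by rw [← h]; exact List.mem_cons_of_mem a hx)))]

theorem pvFoldA (cost : List Int) (T : Int) :
    ∀ (ks pre : List Int) (temp : PySem.Dict Int Int) (p : Int),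
    (pre ++ ks).Nodup → (∀ x, x ∈ cost ↔ x ∈ pre ++ ks) →
    (∀ a ∈ cost, T = a + a → (2 : Int) ∣ pvF cost a) →
    pvInv cost T pre temp →
    (ks.foldl (fun (st : PySem.Dict Int Int × Int) a =>
        pvWhileA T a ((st.1.getD a 0).natAbs + 1) st.1 st.2) (temp, p)).2
      = p + (ks.map (pvQ cost T ks)).sum := by
  intro ks
  induction ks with
  | nil => intro pre temp p _ _ _ _; simp
  | cons a ks ih =>
    intro pre temp p hnd hcov heven hinv
    have ha : a ∈ cost := (hcov a).mpr (by simp)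
    have hpa : a ∉ pre := fun h => (List.disjoint_of_nodup_append hnd) h (by simp)
    obtain ⟨temp', heq, hinv'⟩ := pvStep cost T pre temp p a ha hpa (heven a ha) hinv
    have hnd' : ((pre ++ [a]) ++ ks).Nodup := by
      rw [List.append_assoc]; simpa using hnd
    have hcov' : ∀ x, x ∈ cost ↔ x ∈ (pre ++ [a]) ++ ks := by
      intro x; rw [List.append_assoc]; simpa using hcov x
    have := ih (pre ++ [a]) temp' (p + pvCStep cost T pre a) hnd' hcov' heven hinv'
    rw [List.foldl_cons, heq, this, ← pvSum cost T pre a ks hnd hcov]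
    ring

theorem pvGB_eq_pvQ (cost : List Int) (T : Int) (a : Int) (ha : a ∈ cost) :
    pvGB cost T a = pvQ cost T (PySem.Set.ofList cost) a := by
  unfold pvGB pvQ
  by_cases hself : a = T - a
  · have hb : (T - a) ∈ cost := hself ▸ ha
    rw [if_pos hb, if_neg (show ¬ a < T - a by omega), if_pos hself, if_pos hself]
  · rw [if_neg hself]
    by_cases hb : (T - a) ∈ cost
    · rw [if_pos hb]
      have hbs : (T - a) ∈ PySem.Set.ofList cost := (PySem.Set.mem_ofList cost (T - a)).mpr hb
      by_cases hlt : a < T - a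
      · rw [if_pos hlt, if_pos (show (T - a) ∈ PySem.Set.ofList cost ∧ a < T - a from ⟨hbs, hlt⟩),
          if_neg hself]
      · rw [if_neg hlt, if_neg hself,
          if_neg (show ¬((T - a) ∈ PySem.Set.ofList cost ∧ a < T - a) from fun h => hlt h.2)]
    · rw [if_neg hb,
        if_neg (show ¬((T - a) ∈ PySem.Set.ofList cost ∧ a < T - a) from
          fun h => hb ((PySem.Set.mem_ofList cost (T - a)).mp h.1)), if_neg hself]

theorem pvInnerB (cost : List Int) (T : Int) :
    ((PySem.Dict.counter cost).keys.foldl (fun packages a =>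
      let b := T - a
      if (PySem.Dict.counter cost).contains b = true then
        if a < b then packages + min ((PySem.Dict.counter cost).getD a 0) ((PySem.Dict.counter cost).getD b 0)
        else if a = b then packages + PySem.Int.floordiv ((PySem.Dict.counter cost).getD a 0) 2
        else packages
      else packages) 0)
    = ((PySem.Set.ofList cost).map (pvGB cost T)).sum := by
  rw [PySem.Dict.keys_counter,
    PySem.List.foldl_congr_mem _ _ (fun acc x => acc + pvGB cost T x) 0 ?_,
    PySem.List.foldl_add]
  · ring
  · intro acc a _
    simp only [pvGB]
    by_cases hb : (T - a) ∈ cost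
    · rw [if_pos (by rw [PySem.Dict.contains_counter]; simp [hb]), if_pos hb]
      by_cases hlt : a < T - a
      · rw [if_pos hlt, if_pos hlt, PySem.Dict.getD_counter, PySem.Dict.getD_counter]
        rfl
      · rw [if_neg hlt, if_neg hlt]
        by_cases hself : a = T - a
        · rw [if_pos hself, if_pos hself, PySem.Dict.getD_counter]
          rfl
        · rw [if_neg hself, if_neg hself]
          ring
    · rw [if_neg (by rw [PySem.Dict.contains_counter]; simp [hb]), if_neg hb]
      ring

theorem findMaximumPackages_spec' (cost : List Int) (hpre : Pre_findMaximumPackages cost) :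
    findMaximumPackages cost = findMaximumPackages_alt cost := by
  unfold findMaximumPackages findMaximumPackages_alt
  apply PySem.List.foldl_congr_mem
  intro acc T hT
  change max acc _ = max acc _
  congr 1
  rw [PySem.Dict.keys_counter] at hT
  have hTc : T ∈ cost := (PySem.Set.mem_ofList cost T).mp hT
  have heven : ∀ a ∈ cost, T = a + a → (2 : Int) ∣ pvF cost a := by
    intro a ha hTa
    have h2a : (2 * a) ∈ cost := by rw [show 2 * a = T by omega]; exact hTc
    have := hpre a ha h2a
    unfold pvF
    omega
  have hinv : pvInv cost T [] (PySem.Dict.counter cost) := by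
    constructor
    · intro x
      rw [PySem.Dict.contains_counter]
      simp
    · intro x
      rw [PySem.Dict.getD_counter, pvSpent_nil]
      simp [pvF]
  have hA := pvFoldA cost T (PySem.Dict.counter cost).keys [] (PySem.Dict.counter cost) 0
    (by rw [PySem.Dict.keys_counter]; simp only [List.nil_append]; exact PySem.Set.nodup_ofList cost)
    (by intro x; rw [PySem.Dict.keys_counter]; simp only [List.nil_append]; exact (PySem.Set.mem_ofList cost x).symm)
    heven hinv
  rw [hA, pvInnerB cost T, zero_add, PySem.Dict.keys_counter,
    List.map_congr_left (fun a ha => pvGB_eq_pvQ cost T a ((PySem.Set.mem_ofList cost a).mp ha))]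

-- ===== VERDICT (by name: the statement is the Claim_ definition above) =====
theorem findMaximumPackages_spec : Claim_equal_findMaximumPackages := by
  intro cost _ hpre
  unfold Spec_findMaximumPackages
  exact findMaximumPackages_spec' cost hpre
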